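-- pv_equiv track=rewrite | github.com/dbmcco/driftdriver | driftdriver/upstream_tracker.py | classify_changes
-- ===== SOURCE A (Python) =====
-- _SCHEMA_PATTERNS = {
--     "graph.jsonl", "schema", ".json", ".proto", "migrations",
--     "models.rs", "models.py", "schema.rs",
-- }
--
-- _API_PATTERNS = {
--     "cli", "commands", "cmd", "main.rs", "main.py", "__main__",
--     "api.rs", "api.py", "interface",
-- }
--
-- _INTERNALS_PATTERNS = {
--     "tui", "views", "readme", "changelog", "contributing",
--     "license", ".md", "docs/", "tests/", "fixtures/",
-- }
--
-- _API_KEYWORDS = {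
--     "add command", "new command", "new flag", "new option",
--     "wg retract", "wg cascade", "wg decompose", "wg compact",
--     "breaking", "rename", "remove command",
-- }
--
-- def classify_changes(changed_files: list[str], commit_subjects: list[str]) -> str:
--     """Classify a change set into schema/api-surface/behavior/internals-only.
--
--     Priority: schema > api-surface > behavior > internals-only.
--     Deterministic — no LLM call needed.
--     """
--     files_lower = {f.lower() for f in changed_files}
--     subjects_lower = " ".join(commit_subjects).lower()
--
--     # Schema: data structure files
--     if any(
--         pat in f or f.endswith(pat)
--         for f in files_lower
--         for pat in _SCHEMA_PATTERNS
--     ):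
--         return "schema"
--
--     # API surface: CLI/command changes or API keywords in subjects
--     if any(pat in f for f in files_lower for pat in _API_PATTERNS):
--         return "api-surface"
--     if any(kw in subjects_lower for kw in _API_KEYWORDS):
--         return "api-surface"
--
--     # Internals-only: TUI, docs, tests
--     non_internal = [
--         f for f in files_lower
--         if not any(pat in f for pat in _INTERNALS_PATTERNS)
--     ]
--     if not non_internal:
--         return "internals-only"
--
--     return "behavior"
-- ===== SOURCE B (Python) =====
-- _SCHEMA_PATS = (
--     "graph.jsonl", "schema", ".json", ".proto", "migrations",
--     "models.rs", "models.py", "schema.rs",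
-- )
--
-- _API_PATS = (
--     "cli", "commands", "cmd", "main.rs", "main.py", "__main__",
--     "api.rs", "api.py", "interface",
-- )
--
-- _INTERNALS_PATS = (
--     "tui", "views", "readme", "changelog", "contributing",
--     "license", ".md", "docs/", "tests/", "fixtures/",
-- )
--
-- _KEYWORDS = (
--     "add command", "new command", "new flag", "new option",
--     "wg retract", "wg cascade", "wg decompose", "wg compact",
--     "breaking", "rename", "remove command",
-- )
--
--
-- def _severity(filename: str) -> int:
--     """Map one file to a numeric severity: schema=3 > api=2 > behavior=1 > internal=0."""
--     fl = filename.lower()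
--     if any(p in fl for p in _SCHEMA_PATS):
--         return 3
--     if any(p in fl for p in _API_PATS):
--         return 2
--     if any(p in fl for p in _INTERNALS_PATS):
--         return 0
--     return 1
--
--
-- def classify_changes(changed_files: list[str], commit_subjects: list[str]) -> str:
--     # Reduce the change set to the maximum per-file severity; the category
--     # priority schema > api-surface > behavior > internals-only is exactly
--     # the numeric order of severities, so the classification is a max-reduction.
--     sev = max((_severity(f) for f in changed_files), default=0)
--     subjects = " ".join(commit_subjects).lower()
--     has_keyword = any(k in subjects for k in _KEYWORDS)
--     if sev == 3:
--         return "schema"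
--     if sev == 2 or has_keyword:
--         return "api-surface"
--     if sev == 0:
--         return "internals-only"
--     return "behavior"
-- ===== Notes on version B (the rewrite author's own statement) =====
-- stated objective: alternative
-- what changed: B replaces A's four staged early-return scans (schema scan with a redundant endswith check, api scan, keyword scan, internals filter over a dedup set) by mapping each file to a numeric severity (schema=3 > api=2 > behavior=1 > internal=0) and max-reducing, then decoding the maximum plus a separate keyword flag into the category.
import Mathlib
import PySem

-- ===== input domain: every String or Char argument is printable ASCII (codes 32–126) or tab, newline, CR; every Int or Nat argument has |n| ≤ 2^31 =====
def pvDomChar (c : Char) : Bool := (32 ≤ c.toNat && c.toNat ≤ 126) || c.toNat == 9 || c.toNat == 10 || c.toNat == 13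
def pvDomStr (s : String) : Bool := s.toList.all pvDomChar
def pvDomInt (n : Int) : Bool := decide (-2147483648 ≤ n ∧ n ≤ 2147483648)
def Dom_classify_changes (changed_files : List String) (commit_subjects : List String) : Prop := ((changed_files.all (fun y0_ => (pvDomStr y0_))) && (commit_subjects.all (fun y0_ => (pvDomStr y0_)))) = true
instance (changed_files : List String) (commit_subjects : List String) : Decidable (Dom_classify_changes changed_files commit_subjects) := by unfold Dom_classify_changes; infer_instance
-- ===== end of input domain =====

-- B replaces A's four staged early-return scans by a per-file numeric severity (schema=3 > api=2 >
-- behavior=1 > internal=0) max-reduced over the files, then decoded together with a keyword flag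
-- (alternative decomposition, same cost).

-- ===== PORT A =====
def schemaPatterns : PySem.Set String := PySem.Set.ofList
  ["graph.jsonl", "schema", ".json", ".proto", "migrations", "models.rs", "models.py", "schema.rs"]

def apiPatterns : PySem.Set String := PySem.Set.ofList
  ["cli", "commands", "cmd", "main.rs", "main.py", "__main__", "api.rs", "api.py", "interface"]

def internalsPatterns : PySem.Set String := PySem.Set.ofList
  ["tui", "views", "readme", "changelog", "contributing", "license", ".md", "docs/", "tests/", "fixtures/"]

def apiKeywords : PySem.Set String := PySem.Set.ofList
  ["add command", "new command", "new flag", "new option", "wg retract", "wg cascade",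
   "wg decompose", "wg compact", "breaking", "rename", "remove command"]

def classify_changes (changed_files : List String) (commit_subjects : List String) : String :=
  let files_lower : PySem.Set String := PySem.Set.ofList (changed_files.map PySem.Str.lower)
  let subjects_lower := PySem.Str.lower (PySem.Str.join " " commit_subjects)
  -- the any(...) over the sets: a boolean, so the (unmodelled) set iteration order cannot affect it
  if files_lower.any (fun f => schemaPatterns.any (fun pat =>
       PySem.Str.isIn pat f || PySem.Str.endswith f pat)) then "schema"
  else if files_lower.any (fun f => apiPatterns.any (fun pat => PySem.Str.isIn pat f)) then
    "api-surface"
  else if apiKeywords.any (fun kw => PySem.Str.isIn kw subjects_lower) then "api-surface"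
  else
    let non_internal := files_lower.filter (fun f =>
      !(internalsPatterns.any (fun pat => PySem.Str.isIn pat f)))
    if non_internal = [] then "internals-only" else "behavior"

-- ===== PORT B =====
def schemaPats : List String :=
  ["graph.jsonl", "schema", ".json", ".proto", "migrations", "models.rs", "models.py", "schema.rs"]

def apiPats : List String :=
  ["cli", "commands", "cmd", "main.rs", "main.py", "__main__", "api.rs", "api.py", "interface"]

def internalsPats : List String :=
  ["tui", "views", "readme", "changelog", "contributing", "license", ".md", "docs/", "tests/", "fixtures/"]

def keywordPats : List String :=
  ["add command", "new command", "new flag", "new option", "wg retract", "wg cascade",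
   "wg decompose", "wg compact", "breaking", "rename", "remove command"]

-- _severity: schema=3 > api=2 > behavior=1 > internal=0
def pvSeverity (filename : String) : Nat :=
  let fl := PySem.Str.lower filename
  if schemaPats.any (fun p => PySem.Str.isIn p fl) then 3
  else if apiPats.any (fun p => PySem.Str.isIn p fl) then 2
  else if internalsPats.any (fun p => PySem.Str.isIn p fl) then 0
  else 1

def classify_changes_alt (changed_files : List String) (commit_subjects : List String) : String :=
  -- max(generator, default=0) over nonnegative severities = fold of max from 0
  let sev := changed_files.foldl (fun m f => max m (pvSeverity f)) 0
  let subjects := PySem.Str.lower (PySem.Str.join " " commit_subjects)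
  let has_keyword := keywordPats.any (fun k => PySem.Str.isIn k subjects)
  if sev = 3 then "schema"
  else if sev = 2 || has_keyword then "api-surface"
  else if sev = 0 then "internals-only"
  else "behavior"

-- ===== PRECONDITION & SPEC =====
def Spec_classify_changes (changed_files : List String) (commit_subjects : List String) (out : String) : Prop := out = classify_changes_alt changed_files commit_subjects
instance (changed_files : List String) (commit_subjects : List String) (out : String) : Decidable (Spec_classify_changes changed_files commit_subjects out) := by unfold Spec_classify_changes; infer_instance

-- ===== CLAIM (what is proved, stated in full; the proofs are below) =====
def Claim_equal_classify_changes : Prop := ∀ (changed_files : List String) (commit_subjects : List String), Dom_classify_changes changed_files commit_subjects → Spec_classify_changes changed_files commit_subjects (classify_changes changed_files commit_subjects)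

-- ===== LEMMAS AND PROOFS =====

-- f.endswith(pat) implies pat in f, so the disjunct is redundant
theorem isIn_or_endswith (pat f : String) :
    (PySem.Str.isIn pat f || PySem.Str.endswith f pat) = PySem.Str.isIn pat f := by
  cases he : PySem.Str.endswith f pat
  · simp
  · have : PySem.Str.isIn pat f = true := by
      rw [PySem.Str.isIn_iff_infix]
      have := (PySem.Chars.endswith_iff f.toList pat.toList).mp
        (by rw [← PySem.Str.endswith_eq]; exact he)
      exact this.isInfix
    rw [this]; simp

-- any over the dedup set of lowered files = any over the map
theorem set_any_eq (l : List String) (p : String → Bool) :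
    (PySem.Set.ofList (l.map PySem.Str.lower)).any p = l.any (fun f => p (PySem.Str.lower f)) := by
  rcases h : (PySem.Set.ofList (l.map PySem.Str.lower)).any p with _ | _
  · symm
    rw [List.any_eq_false] at h ⊢
    intro f hf
    exact h _ ((PySem.Set.mem_ofList _ _).mpr (List.mem_map_of_mem hf))
  · symm
    rw [List.any_eq_true] at h ⊢
    obtain ⟨x, hx, hpx⟩ := h
    obtain ⟨f, hf, rfl⟩ := List.mem_map.mp ((PySem.Set.mem_ofList _ _).mp hx)
    exact ⟨f, hf, hpx⟩

-- the filter-emptiness test = all over the original list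
theorem filter_nil_eq_all (l : List String) (p : String → Bool) :
    (decide ((PySem.Set.ofList (l.map PySem.Str.lower)).filter (fun f => !(p f)) = []))
      = l.all (fun f => p (PySem.Str.lower f)) := by
  rcases h : l.all (fun f => p (PySem.Str.lower f)) with _ | _
  · rw [List.all_eq_false] at h
    obtain ⟨f, hf, hpf⟩ := h
    have hmem : PySem.Str.lower f ∈ PySem.Set.ofList (l.map PySem.Str.lower) :=
      (PySem.Set.mem_ofList _ _).mpr (List.mem_map_of_mem hf)
    simp only [decide_eq_false_iff_not]
    intro hnil
    have := List.filter_eq_nil_iff.mp hnil _ hmem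
    simp [hpf] at this
  · rw [List.all_eq_true] at h
    simp only [decide_eq_true_eq]
    apply List.filter_eq_nil_iff.mpr
    intro x hx
    obtain ⟨f, hf, rfl⟩ := List.mem_map.mp ((PySem.Set.mem_ofList _ _).mp hx)
    simp [h f hf]

-- the staged-scan description of the severity maximum
def pvMaxDescr (l : List String) : Nat :=
  if l.any (fun f => schemaPats.any (fun p => PySem.Str.isIn p (PySem.Str.lower f))) then 3
  else if l.any (fun f => apiPats.any (fun p => PySem.Str.isIn p (PySem.Str.lower f))) then 2
  else if l.all (fun f => internalsPats.any (fun p => PySem.Str.isIn p (PySem.Str.lower f))) then 0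
  else 1

theorem pvMaxAux (a b c d e g : Bool) :
    (if (a || d) = true then 3 else if (b || e) = true then 2
     else if (c && g) = true then (0 : Nat) else 1)
    = max (if a = true then 3 else if b = true then 2 else if c = true then 0 else 1)
          (if d = true then 3 else if e = true then 2 else if g = true then 0 else 1) := by
  cases a <;> cases b <;> cases c <;> cases d <;> cases e <;> cases g <;> rfl

theorem pvMaxDescr_cons (f : String) (t : List String) :
    pvMaxDescr (f :: t) = max (pvSeverity f) (pvMaxDescr t) := by
  unfold pvMaxDescr pvSeverity
  simp only [List.any_cons, List.all_cons]
  exact pvMaxAux _ _ _ _ _ _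

theorem foldl_max_eq (l : List String) (a : Nat) :
    l.foldl (fun m f => max m (pvSeverity f)) a = max a (pvMaxDescr l) := by
  induction l generalizing a with
  | nil => simp [pvMaxDescr]
  | cons f t ih =>
    rw [List.foldl_cons, ih, pvMaxDescr_cons]
    omega

-- ===== VERDICT (by name: the statement is the Claim_ definition above) =====
theorem classify_changes_spec : Claim_equal_classify_changes := by
  intro changed_files commit_subjects _
  show classify_changes changed_files commit_subjects
      = classify_changes_alt changed_files commit_subjects
  unfold classify_changes classify_changes_alt
  rw [foldl_max_eq, Nat.zero_max]
  simp only [isIn_or_endswith, set_any_eq]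
  have hpats : (schemaPatterns : List String) = schemaPats := by decide
  have hapi : (apiPatterns : List String) = apiPats := by decide
  have hint : (internalsPatterns : List String) = internalsPats := by decide
  have hkw : (apiKeywords : List String) = keywordPats := by decide
  rw [hpats, hapi, hint, hkw]
  have hiff : ((PySem.Set.ofList (changed_files.map PySem.Str.lower)).filter
        (fun f => !(internalsPats.any (fun pat => PySem.Str.isIn pat f))) = [])
      ↔ (changed_files.all (fun f =>
          internalsPats.any (fun pat => PySem.Str.isIn pat (PySem.Str.lower f))) = true) := by
    rw [← filter_nil_eq_all changed_files
      (fun f => internalsPats.any (fun pat => PySem.Str.isIn pat f))]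
    exact (decide_eq_true_iff).symm
  unfold pvMaxDescr
  cases hs : changed_files.any
      (fun f => schemaPats.any fun p => PySem.Str.isIn p (PySem.Str.lower f)) <;>
    cases ha : changed_files.any
      (fun f => apiPats.any fun p => PySem.Str.isIn p (PySem.Str.lower f)) <;>
    cases hk : keywordPats.any
      (fun k => PySem.Str.isIn k (PySem.Str.lower (PySem.Str.join " " commit_subjects))) <;>
    cases hI : changed_files.all
      (fun f => internalsPats.any fun pat => PySem.Str.isIn pat (PySem.Str.lower f)) <;>
    rw [hI] at hiff <;>
    simp only [hiff] <;>
    simp
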